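-- pv_equiv track=rewrite | github.com/PeterCullenBurbery/go-programs | repl/python/phone-mapping-with-support-for-special-characters-and-letters/program-that-maps-letters-and-special-characters-to-phone-numbers-without-leading-zeroes.py | group_integer
-- ===== SOURCE A (Python) =====
-- def group_integer(value_str, k):
--     """
--     Groups the integer part.
--     The first group contains the remainder, preventing leading zeros.
--     """
--     if not value_str or value_str == "0":
--         return "0"
--
--     s = value_str
--     n = len(s)
--     remainder = n % k
--     groups = []
--
--     if remainder > 0:
--         groups.append(s[:remainder])
--
--     for i in range(remainder, n, k):
--         groups.append(s[i:i + k])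
--
--     return "_".join(groups)
-- ===== SOURCE B (Python) =====
-- def group_integer(value_str, k):
--     """
--     Groups the integer part in one character-level pass: walk the string
--     left to right and emit a '_' before every position whose distance to
--     the end is a positive multiple of k. No slicing, no chunk list.
--     """
--     if not value_str or value_str == "0":
--         return "0"
--     n = len(value_str)
--     out = []
--     for i, ch in enumerate(value_str):
--         if i and (n - i) % k == 0:
--             out.append('_')
--         out.append(ch)
--     return ''.join(out)
-- ===== Notes on version B (the rewrite author's own statement) =====
-- stated objective: alternative
-- what changed: B replaces A's chunk-and-join (compute n % k, collect k-sized slices, '_'.join) by a single character-level pass that emits a '_' separator before each character whose distance to the end is a multiple of k; no slices and no group list are ever built.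
-- outside the precondition, e.g. on group_integer('123', -2): A returns '', B returns '1_23'; on group_integer('5', 0): A raises ZeroDivisionError, B returns '5'
import Mathlib
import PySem

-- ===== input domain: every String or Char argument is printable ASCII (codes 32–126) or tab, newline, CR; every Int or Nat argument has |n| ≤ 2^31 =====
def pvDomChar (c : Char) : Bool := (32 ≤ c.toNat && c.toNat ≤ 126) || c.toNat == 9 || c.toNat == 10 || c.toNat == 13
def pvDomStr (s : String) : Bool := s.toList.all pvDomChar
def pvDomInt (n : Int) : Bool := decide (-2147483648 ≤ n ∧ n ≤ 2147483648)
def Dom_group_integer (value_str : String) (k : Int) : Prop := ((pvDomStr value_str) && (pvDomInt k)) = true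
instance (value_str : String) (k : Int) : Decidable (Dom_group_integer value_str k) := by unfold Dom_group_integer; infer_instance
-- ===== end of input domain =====

-- B replaces A's chunk-and-join (remainder, k-sized slices, '_'.join) by a single character-level
-- pass emitting '_' before each position whose distance to the end is a multiple of k (objective: alternative).

-- ===== PORT A =====
def group_integer (value_str : String) (k : Int) : String :=
  if value_str = "" ∨ value_str = "0" then "0"
  else
    let s := value_str
    let n := PySem.Str.len s
    let remainder := PySem.Int.mod n k
    let groups0 : List String :=
      if remainder > 0 then [PySem.Str.slice s none (some remainder)] else []
    let groups := (PySem.List.pyRange remainder n k).foldl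
      (fun gs i => gs ++ [PySem.Str.slice s (some i) (some (i + k))]) groups0
    PySem.Str.join "_" groups

-- ===== PORT B =====
def group_integer_alt (value_str : String) (k : Int) : String :=
  if value_str = "" ∨ value_str = "0" then "0"
  else
    let n := PySem.Str.len value_str
    let out := (PySem.List.enumerate value_str.toList).foldl
      (fun acc (p : Int × Char) =>
        (if p.1 ≠ 0 ∧ PySem.Int.mod (n - p.1) k = 0 then acc ++ ["_"] else acc)
          ++ [String.ofList [p.2]])
      ([] : List String)
    PySem.Str.join "" out

-- ===== PRECONDITION & SPEC =====
-- Pre_ excludes k ≤ 0 on non-guard strings: for k = 0 Python A raises ZeroDivisionError, and for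
-- k < 0 A returns "" (all digits silently discarded) — an accident of Python's negative modulo
-- feeding an empty range; no output is specified for a non-positive group size.
def Pre_group_integer (value_str : String) (k : Int) : Prop :=
  value_str = "" ∨ value_str = "0" ∨ 0 < k
instance (value_str : String) (k : Int) : Decidable (Pre_group_integer value_str k) := by
  unfold Pre_group_integer; infer_instance

def pvWitness_group_integer : String × Int := ("1234567", 3)

def Spec_group_integer (value_str : String) (k : Int) (out : String) : Prop := out = group_integer_alt value_str k
instance (value_str : String) (k : Int) (out : String) : Decidable (Spec_group_integer value_str k out) := by unfold Spec_group_integer; infer_instance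

-- ===== CLAIM (what is proved, stated in full; the proofs are below) =====
def Claim_equal_group_integer : Prop := ∀ (value_str : String) (k : Int), Dom_group_integer value_str k → Pre_group_integer value_str k → Spec_group_integer value_str k (group_integer value_str k)

-- ===== LEMMAS AND PROOFS =====

theorem pvRangeNilPos {a b s : Int} (hs : 0 < s) (hb : b ≤ a) :
    PySem.List.pyRange a b s = [] := by
  rw [PySem.List.pyRange_of_pos a b hs, if_neg (by omega)]; simp

theorem pvRangeConsPos {a b k : Int} (hk : 0 < k) (hab : a < b) :
    PySem.List.pyRange a b k = a :: PySem.List.pyRange (a + k) b k := by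
  rw [PySem.List.pyRange_of_pos a b hk, PySem.List.pyRange_of_pos (a + k) b hk, if_pos hab]
  by_cases h2 : a + k < b
  · rw [if_pos h2]
    have h3 : (b - a + k - 1) / k = (b - (a + k) + k - 1) / k + 1 := by
      have he : b - a + k - 1 = (b - (a + k) + k - 1) + k * 1 := by ring
      rw [he, Int.add_mul_ediv_left _ _ (by omega)]
    have h4 : 0 ≤ (b - (a + k) + k - 1) / k := Int.ediv_nonneg (by omega) (by omega)
    have hcount : ((b - a + k - 1) / k).toNat = ((b - (a + k) + k - 1) / k).toNat + 1 := by omega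
    rw [hcount, List.range_succ_eq_map]
    simp only [List.map_cons, List.map_map]
    congr 1
    · simp
    · apply List.map_congr_left
      intro j _
      simp only [Function.comp]
      push_cast
      ring
  · rw [if_neg h2]
    have hdiv : (b - a + k - 1) / k = 1 := by
      have he : b - a + k - 1 = (b - a - 1) + k * 1 := by ring
      rw [he, Int.add_mul_ediv_left _ _ (by omega),
        Int.ediv_eq_zero_of_lt (by omega) (by omega)]
      ring
    rw [hdiv]
    simp

-- ''.join over singleton-flattening: join with empty separator is flatten
theorem pvJoinNilCons (p : List Char) (ps : List (List Char)) :
    PySem.Chars.join [] (p :: ps) = p ++ PySem.Chars.join [] ps := by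
  cases ps with
  | nil => simp [PySem.Chars.join_singleton]
  | cons q r => rw [PySem.Chars.join_cons_cons]; simp

theorem pvJoinNilFlat (ps : List (List Char)) :
    PySem.Chars.join [] ps = ps.flatten := by
  induction ps with
  | nil => simp [PySem.Chars.join_nil]
  | cons p ps ih => rw [pvJoinNilCons, ih]; simp

-- '_'.join as "first part, then '_' before every later part"
theorem pvJoinUnderscore (p : List Char) (ps : List (List Char)) :
    PySem.Chars.join ['_'] (p :: ps) = p ++ ps.flatMap (fun q => '_' :: q) := by
  induction ps generalizing p with
  | nil => simp [PySem.Chars.join_singleton]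
  | cons q r ih => rw [PySem.Chars.join_cons_cons, ih q]; simp

-- a stretch of the enumerate pass on which the separator condition never fires copies the characters
theorem pvNoSep (n k : Int) (a : List Char) :
    ∀ j : Int, (∀ t : Int, j ≤ t → t < j + a.length → ¬(t ≠ 0 ∧ PySem.Int.mod (n - t) k = 0)) →
    (PySem.List.enumerate a j).flatMap
      (fun p => (if p.1 ≠ 0 ∧ PySem.Int.mod (n - p.1) k = 0 then ['_'] else []) ++ [p.2]) = a := by
  induction a with
  | nil => intro j _; simp [PySem.List.enumerate]
  | cons c cs ih =>
    intro j h
    rw [PySem.List.enumerate_cons, List.flatMap_cons]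
    have hj : ¬(j ≠ 0 ∧ PySem.Int.mod (n - j) k = 0) := h j le_rfl (by simp)
    rw [if_neg hj, ih (j + 1) (fun t h1 h2 => h t (by omega) (by simp at h2 ⊢; omega))]
    simp

-- the enumerate pass over the suffix starting at a chunk boundary i (0 < i, k ∣ n - i) produces
-- '_' before every k-chunk, i.e. exactly the flatMap over A's chunk-start range
theorem pvMain (cs : List Char) (n k : Int) (hn : n = (cs.length : Int)) (hk : 0 < k) :
    ∀ (fuel : Nat) (i : Int), 0 < i → i ≤ n → n - i ≤ (fuel : Int) → k ∣ (n - i) →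
    (PySem.List.enumerate (cs.drop i.toNat) i).flatMap
      (fun p => (if p.1 ≠ 0 ∧ PySem.Int.mod (n - p.1) k = 0 then ['_'] else []) ++ [p.2])
    = (PySem.List.pyRange i n k).flatMap
        (fun j => '_' :: (cs.drop j.toNat).take k.toNat) := by
  intro fuel
  induction fuel with
  | zero =>
    intro i hi0 hin hfuel _
    have hieq : i = n := by omega
    have hdrop : cs.drop i.toNat = [] := by
      apply List.drop_eq_nil_of_le; omega
    rw [hdrop, pvRangeNilPos hk (le_of_eq hieq.symm)]
    simp [PySem.List.enumerate]
  | succ fuel ih =>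
    intro i hi0 hin hfuel hdvd
    by_cases hieq : i = n
    · have hdrop : cs.drop i.toNat = [] := by
        apply List.drop_eq_nil_of_le; omega
      rw [hdrop, pvRangeNilPos hk (le_of_eq hieq.symm)]
      simp [PySem.List.enumerate]
    · have hilt : i < n := lt_of_le_of_ne hin hieq
      have hik : i + k ≤ n := by
        have := Int.le_of_dvd (by omega) hdvd
        omega
      -- split the suffix into its first k-chunk and the rest
      set chunk := (cs.drop i.toNat).take k.toNat with hchunk
      have hlen : chunk.length = k.toNat := by
        rw [hchunk, List.length_take, List.length_drop]
        omega
      have hsplit : cs.drop i.toNat = chunk ++ cs.drop (i + k).toNat := by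
        rw [hchunk]
        have h1 : (cs.drop i.toNat).drop k.toNat = cs.drop (i + k).toNat := by
          rw [List.drop_drop]
          congr 1
          omega
        conv_lhs => rw [← List.take_append_drop k.toNat (cs.drop i.toNat)]
        rw [h1]
      rw [hsplit, PySem.List.enumerate_append, List.flatMap_append, hlen,
        show i + (k.toNat : Int) = i + k by omega]
      -- the first chunk: separator at its head, none inside
      have hchunkne : chunk ≠ [] := by
        intro h
        rw [h] at hlen
        simp at hlen
        omega
      obtain ⟨c, tail, hct⟩ := List.exists_cons_of_ne_nil hchunkne
      have htail : tail.length = k.toNat - 1 := by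
        have := hlen
        rw [hct] at this
        simp at this
        omega
      have hhead :
          (PySem.List.enumerate chunk i).flatMap
            (fun p => (if p.1 ≠ 0 ∧ PySem.Int.mod (n - p.1) k = 0 then ['_'] else []) ++ [p.2])
          = '_' :: chunk := by
        rw [hct, PySem.List.enumerate_cons, List.flatMap_cons,
          if_pos ⟨by omega, (PySem.Int.mod_eq_zero_iff_dvd _ _).mpr hdvd⟩,
          pvNoSep n k tail (i + 1) ?_]
        · simp
        · intro t h1 h2 ⟨_, hm⟩
          have hd2 : k ∣ (n - t) := (PySem.Int.mod_eq_zero_iff_dvd _ _).mp hm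
          have hd3 : k ∣ (t - i) := by
            have : t - i = (n - i) - (n - t) := by ring
            rw [this]
            exact dvd_sub hdvd hd2
          have h4 : 0 < t - i := by omega
          have h5 : t - i < k := by
            rw [htail] at h2
            omega
          have := Int.le_of_dvd h4 hd3
          omega
      rw [hhead, pvRangeConsPos hk hilt, List.flatMap_cons,
        ih (i + k) (by omega) hik (by omega) (by
          have : n - (i + k) = (n - i) - k := by ring
          rw [this]
          exact dvd_sub hdvd dvd_rfl)]

-- ===== VERDICT (by name: the statement is the Claim_ definition above) =====
theorem group_integer_spec : Claim_equal_group_integer := by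
  unfold Claim_equal_group_integer
  intro v k _ hpre
  unfold Spec_group_integer group_integer group_integer_alt
  by_cases hg : v = "" ∨ v = "0"
  · rw [if_pos hg, if_pos hg]
  · rw [if_neg hg, if_neg hg]
    dsimp only
    have hk : 0 < k := by
      rcases hpre with h | h | h
      · exact absurd (Or.inl h) hg
      · exact absurd (Or.inr h) hg
      · exact h
    set cs := v.toList with hcs
    have hn : PySem.Str.len v = (cs.length : Int) := by rw [PySem.Str.len_eq]
    set n := PySem.Str.len v with hnv
    have hn1 : 0 < cs.length :=
      List.length_pos_iff.mpr (fun he => hg (Or.inl (String.toList_eq_nil_iff.mp (hcs ▸ he))))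
    set r := PySem.Int.mod n k with hr
    have hr0 : 0 ≤ r := PySem.Int.mod_nonneg n hk
    have hrk : r < k := PySem.Int.mod_lt n hk
    have hdvdnr : k ∣ (n - r) := by
      refine ⟨PySem.Int.floordiv n k, ?_⟩
      have := PySem.Int.floordiv_mul_add_mod n k
      rw [hr, hnv]
      linarith [mul_comm (PySem.Int.floordiv n k) k]
    have hrn : r ≤ n := by
      have hq : 0 ≤ PySem.Int.floordiv n k := by
        rw [PySem.Int.floordiv_eq_ediv_of_pos hk]
        exact Int.ediv_nonneg (by omega) (by omega)
      have := PySem.Int.floordiv_mul_add_mod n k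
      nlinarith
    -- A's groups as a list of chunk-strings
    rw [PySem.List.foldl_append_singleton_eq_map]
    -- compare as character lists
    apply String.toList_inj.mp
    rw [PySem.Str.toList_join, PySem.Str.toList_join]
    -- B's foldl → flatMap of string pieces → character flatMap
    have hfold : List.foldl
        (fun acc (p : Int × Char) =>
          (if p.1 ≠ 0 ∧ PySem.Int.mod (n - p.1) k = 0 then acc ++ ["_"] else acc)
            ++ [String.ofList [p.2]])
        [] (PySem.List.enumerate cs)
        = (PySem.List.enumerate cs).flatMap
            (fun p => (if p.1 ≠ 0 ∧ PySem.Int.mod (n - p.1) k = 0 then ["_"] else [])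
              ++ [String.ofList [p.2]]) := by
      rw [PySem.List.foldl_congr_mem (PySem.List.enumerate cs) _
          (fun acc (p : Int × Char) => acc ++
            ((if p.1 ≠ 0 ∧ PySem.Int.mod (n - p.1) k = 0 then ["_"] else []) ++ [String.ofList [p.2]]))
          [] (by
            intro acc p _
            by_cases h : p.1 ≠ 0 ∧ PySem.Int.mod (n - p.1) k = 0 <;> simp [h]),
        PySem.List.foldl_append_eq_flatMap, List.nil_append]
    rw [hfold]
    have hB : PySem.Chars.join "".toList
        (((PySem.List.enumerate cs).flatMap
          (fun p => (if p.1 ≠ 0 ∧ PySem.Int.mod (n - p.1) k = 0 then ["_"] else [])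
            ++ [String.ofList [p.2]])).map String.toList)
        = (PySem.List.enumerate cs).flatMap
            (fun p => (if p.1 ≠ 0 ∧ PySem.Int.mod (n - p.1) k = 0 then ['_'] else []) ++ [p.2]) := by
      rw [show "".toList = ([] : List Char) by rfl, pvJoinNilFlat, List.map_flatMap,
        List.flatten_eq_flatMap, List.flatMap_assoc]
      apply List.flatMap_congr
      intro p _
      split_ifs <;> simp
    rw [hB]
    -- A's slices are take/drop chunks
    have hmap : List.map String.toList
          ((PySem.List.pyRange r n k).map
            (fun i => PySem.Str.slice v (some i) (some (i + k))))
        = (PySem.List.pyRange r n k).map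
          (fun j => (cs.drop j.toNat).take k.toNat) := by
      rw [List.map_map]
      apply List.map_congr_left
      intro i hi
      simp only [Function.comp]
      obtain ⟨h1, h2, _⟩ := (PySem.List.mem_pyRange_iff_of_pos hk i).mp hi
      rw [PySem.Str.toList_slice, PySem.Chars.slice_eq_listSlice,
        PySem.List.slice_toNat cs (by omega) (by omega),
        show (i + k).toNat - i.toNat = k.toNat by omega]
    by_cases hrpos : r > 0
    · -- remainder group first
      rw [if_pos hrpos, List.singleton_append, List.map_cons, hmap,
        show "_".toList = ['_'] by rfl, pvJoinUnderscore, List.flatMap_map,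
        PySem.Str.toList_slice, PySem.Chars.slice_eq_listSlice,
        PySem.List.slice_to cs (by omega)]
      -- split B's pass at position r
      conv_rhs => rw [show cs = cs.take r.toNat ++ cs.drop r.toNat from
        (List.take_append_drop r.toNat cs).symm]
      rw [show PySem.List.enumerate (cs.take r.toNat ++ cs.drop r.toNat) =
          PySem.List.enumerate (cs.take r.toNat ++ cs.drop r.toNat) 0 from rfl,
        PySem.List.enumerate_append, List.flatMap_append,
        List.length_take, show min r.toNat cs.length = r.toNat by omega,
        show (0 : Int) + (r.toNat : Int) = r by omega,
        pvNoSep n k (cs.take r.toNat) 0 ?_,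
        pvMain cs n k hn.symm hk (n - r).toNat r hrpos (by omega) (by omega) hdvdnr]
      intro t h1 h2 ⟨ht0, hm⟩
      have hd2 : k ∣ (n - t) := (PySem.Int.mod_eq_zero_iff_dvd _ _).mp hm
      have hd3 : k ∣ (r - t) := by
        have : r - t = (n - t) - (n - r) := by ring
        rw [this]
        exact dvd_sub hd2 hdvdnr
      rw [List.length_take] at h2
      have h4 : 0 < r - t := by omega
      have := Int.le_of_dvd h4 hd3
      omega
    · -- no remainder: k divides n
      have hreq : r = 0 := by omega
      have hdvdn : k ∣ n := by
        have := hdvdnr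
        rw [hreq] at this
        simpa using this
      have hkn : k ≤ n := Int.le_of_dvd (by omega) hdvdn
      rw [if_neg hrpos, List.nil_append, hmap, hreq,
        pvRangeConsPos hk (by omega), List.map_cons,
        show "_".toList = ['_'] by rfl, pvJoinUnderscore, List.flatMap_map,
        show (0 : Int) + k = k by ring,
        show ((0 : Int).toNat) = 0 by rfl, List.drop_zero]
      conv_rhs => rw [show cs = cs.take k.toNat ++ cs.drop k.toNat from
        (List.take_append_drop k.toNat cs).symm]
      rw [show PySem.List.enumerate (cs.take k.toNat ++ cs.drop k.toNat) =
          PySem.List.enumerate (cs.take k.toNat ++ cs.drop k.toNat) 0 from rfl,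
        PySem.List.enumerate_append, List.flatMap_append,
        List.length_take, show min k.toNat cs.length = k.toNat by omega,
        show (0 : Int) + (k.toNat : Int) = k by omega,
        pvNoSep n k (cs.take k.toNat) 0 ?_,
        pvMain cs n k hn.symm hk (n - k).toNat k hk hkn (by omega)
          (by exact dvd_sub hdvdn dvd_rfl)]
      intro t h1 h2 ⟨ht0, hm⟩
      have hd2 : k ∣ (n - t) := (PySem.Int.mod_eq_zero_iff_dvd _ _).mp hm
      have hd3 : k ∣ t := by
        have : t = n - (n - t) := by ring
        rw [this]
        exact dvd_sub hdvdn hd2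
      rw [List.length_take] at h2
      have := Int.le_of_dvd (by omega) hd3
      omega
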